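-- pv_equiv track=rewrite | github.com/lucinda-paddock/BaumWelch | baum/baumWelch.py | makeTransIndexD
-- ===== SOURCE A (Python) =====
-- def makeTransIndexD(seq):
--     '''Given a sequnce, makes a dictionary where the keys are all
--     possible trnasitions and the values are all indexes where that
--     transition can occur. This allows us to only loop through the whole
--     sequnce one, improving efficiency.'''
--     transIndexD = {}
--     for i in range(len(seq)-1): #all possible nucleotide pairs
--         nuc1 = seq[i]
--         nuc2 = seq[i+1]
--         nucPairList = [nuc1+nuc2, nuc1+nuc2.lower(), nuc1.lower()+nuc2, nuc1.lower()+nuc2.lower()]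
--         for nucPair in nucPairList: #all possible transitions
--             if not nucPair in transIndexD:
--                 transIndexD[nucPair] = (i,)
--             else:
--                 transIndexD[nucPair] = transIndexD[nucPair] + (i,)
--     return transIndexD
-- ===== SOURCE B (Python) =====
-- def makeTransIndexD(seq):
--     '''Alternative decomposition: flatten the sequence into a flat
--     (transition, index) event list, dedup the transition keys in first
--     occurrence order, then build each key's index tuple by filtering
--     the event list.'''
--     events = [(v, i)
--               for i, (a, b) in enumerate(zip(seq, seq[1:]))
--               for v in (a + b, a + b.lower(), a.lower() + b, a.lower() + b.lower())]
--     keys = dict.fromkeys(v for v, _ in events)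
--     return {k: tuple(i for v, i in events if v == k) for k in keys}
-- ===== Notes on version B (the rewrite author's own statement) =====
-- stated objective: faster
-- what changed: Replaces A's incremental dict of tuples (whose per-key tuple + (i,) concatenation re-copies the whole value each time) with a flatten-then-group decomposition: a zip/enumerate comprehension builds a flat (transition, index) event list, the keys are deduped in first-occurrence order with dict.fromkeys, and each key's index tuple is produced by one filtering pass over the event list.
import Mathlib
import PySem

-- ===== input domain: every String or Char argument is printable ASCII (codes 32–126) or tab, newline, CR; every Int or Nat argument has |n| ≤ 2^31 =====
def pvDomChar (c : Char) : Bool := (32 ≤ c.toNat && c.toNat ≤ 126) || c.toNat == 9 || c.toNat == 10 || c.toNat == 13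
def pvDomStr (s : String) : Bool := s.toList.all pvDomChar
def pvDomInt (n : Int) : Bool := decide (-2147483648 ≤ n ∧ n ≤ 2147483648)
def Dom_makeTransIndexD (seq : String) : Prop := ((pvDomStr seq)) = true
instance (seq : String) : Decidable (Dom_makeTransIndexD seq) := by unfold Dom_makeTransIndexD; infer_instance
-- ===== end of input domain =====

-- B replaces A's incremental dict-of-tuples pass (quadratic tuple re-copying) with a
-- flatten/dedup/filter decomposition; same exact return value, measured faster on large inputs.

-- ===== PORT A =====
-- the four case-variants of the pair, as in A's nucPairList (nuc1, nuc2 are 1-char strings)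
def pvNucPairListA (nuc1 nuc2 : List Char) : List String :=
  [String.ofList (nuc1 ++ nuc2), String.ofList (nuc1 ++ PySem.Chars.lower nuc2),
   String.ofList (PySem.Chars.lower nuc1 ++ nuc2),
   String.ofList (PySem.Chars.lower nuc1 ++ PySem.Chars.lower nuc2)]

def makeTransIndexD (seq : String) : List (String × List Int) :=
  let cs := seq.toList
  let d : PySem.Dict String (List Int) :=
    (PySem.List.pyRange 0 (PySem.Str.len seq - 1) 1).foldl (fun d i =>
      -- i ∈ range(len(seq)-1), so seq[i] and seq[i+1] are always in range: getD is exact here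
      let nuc1 : List Char := [PySem.List.pyGetD cs i ' ']
      let nuc2 : List Char := [PySem.List.pyGetD cs (i + 1) ' ']
      (pvNucPairListA nuc1 nuc2).foldl (fun d nucPair =>
        if !(d.contains nucPair) then d.insert nucPair [i]
        else d.insert nucPair (d.getD nucPair [] ++ [i])) d)
      PySem.Dict.empty
  d.items

-- ===== PORT B =====
-- the four case-variants built from the two chars of a zipped pair, as in Source B's tuple
def pvNucPairListB (a b : Char) : List String :=
  [String.ofList ([a] ++ [b]), String.ofList ([a] ++ PySem.Chars.lower [b]),
   String.ofList (PySem.Chars.lower [a] ++ [b]),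
   String.ofList (PySem.Chars.lower [a] ++ PySem.Chars.lower [b])]

def makeTransIndexD_alt (seq : String) : List (String × List Int) :=
  let cs := seq.toList
  let events : List (String × Int) :=
    (PySem.List.enumerate (List.zip cs (PySem.List.slice cs (some 1) none))).flatMap
      (fun p => (pvNucPairListB p.2.1 p.2.2).map (fun v => (v, p.1)))
  let keys : List String := PySem.List.dedup (events.map (fun e => e.1))
  keys.map (fun k => (k, (events.filter (fun e => e.1 == k)).map (fun e => e.2)))

-- ===== PRECONDITION & SPEC =====
def Spec_makeTransIndexD (seq : String) (out : List (String × List Int)) : Prop := out = makeTransIndexD_alt seq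
instance (seq : String) (out : List (String × List Int)) : Decidable (Spec_makeTransIndexD seq out) := by unfold Spec_makeTransIndexD; infer_instance

-- ===== CLAIM (what is proved, stated in full; the proofs are below) =====
def Claim_equal_makeTransIndexD : Prop := ∀ (seq : String), Dom_makeTransIndexD seq → Spec_makeTransIndexD seq (makeTransIndexD seq)

-- ===== LEMMAS AND PROOFS =====

-- A's flat event list: the same (variant, index) pairs that Source B's comprehension produces,
-- but indexed through pyRange/pyGetD the way A reads the sequence.
def pvEventsA (cs : List Char) : List (String × Int) :=
  (PySem.List.pyRange 0 (PySem.Chars.len cs - 1) 1).flatMap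
    (fun i => (pvNucPairListA [PySem.List.pyGetD cs i ' '] [PySem.List.pyGetD cs (i + 1) ' ']).map
      (fun v => (v, i)))

-- A's if/else dict update is exactly d[k] = d.get(k, []) + [i]
theorem pvStepA_eq_modify (d : PySem.Dict String (List Int)) (k : String) (i : Int) :
    (if !(d.contains k) then d.insert k [i] else d.insert k (d.getD k [] ++ [i]))
      = d.modify k [] (· ++ [i]) := by
  unfold PySem.Dict.modify
  by_cases h : d.contains k
  · simp [h]
  · simp [h, PySem.Dict.getD_of_not_contains d [] (by simpa using h)]

-- A's nested loops are the single grouping fold over the flat event list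
theorem pvA_eq_group (seq : String) :
    makeTransIndexD seq =
      ((pvEventsA seq.toList).foldl (fun d p => d.modify p.1 [] (· ++ [p.2]))
        PySem.Dict.empty).items := by
  unfold makeTransIndexD pvEventsA
  dsimp only
  rw [List.foldl_flatMap]
  simp only [PySem.Str.len_eq, PySem.Chars.len_eq]
  congr 1
  apply PySem.List.foldl_congr_mem
  intro d i _
  rw [List.foldl_map]
  apply PySem.List.foldl_congr_mem
  intro d' v _
  exact pvStepA_eq_modify d' v i

-- items of the grouping fold = dedup'd keys paired with the filtered indices
theorem pvGroup_items (es : List (String × Int)) :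
    ((es.foldl (fun d p => d.modify p.1 [] (· ++ [p.2])) PySem.Dict.empty).items
      : List (String × List Int))
    = (PySem.List.dedup (es.map (fun e => e.1))).map
        (fun k => (k, (es.filter (fun e => e.1 == k)).map (fun e => e.2))) := by
  have hnd : ((es.foldl (fun d p => d.modify p.1 [] (· ++ [p.2])) PySem.Dict.empty).keys).Nodup := by
    have := PySem.Dict.nodup_keys_foldl_modify_key es (fun p => p.1) []
      (fun _ p => (· ++ [p.2])) PySem.Dict.empty PySem.Dict.nodup_keys_empty
    simpa using this
  rw [PySem.Dict.items_eq_map_keys _ hnd []]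
  have hkeys : ((es.foldl (fun d p => d.modify p.1 [] (· ++ [p.2])) PySem.Dict.empty).keys)
      = PySem.List.dedup (es.map (fun e => e.1)) := by
    have := PySem.Dict.keys_foldl_modify_key es (fun p => p.1) []
      (fun _ p => (· ++ [p.2])) PySem.Dict.empty
    simp only [PySem.List.dedup_eq_ofList]
    simpa [PySem.Set.update_nil_left] using this
  rw [hkeys]
  apply List.map_congr_left
  intro k _
  have := PySem.Dict.getD_foldl_modify_append es PySem.Dict.empty k
  simp only [PySem.Dict.getD_empty, List.nil_append] at this
  simp [this]

-- A's event list is exactly Source B's zip/enumerate event list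
theorem pvEvents_eq (seq : String) :
    ((PySem.List.enumerate (List.zip seq.toList (PySem.List.slice seq.toList (some 1) none))).flatMap
      (fun p => (pvNucPairListB p.2.1 p.2.2).map (fun v => (v, p.1))))
    = pvEventsA seq.toList := by
  set cs := seq.toList with hcs
  rw [PySem.List.slice_from cs (by norm_num)]
  simp only [Int.toNat_one]
  rw [PySem.List.enumerate_eq_map_pyRange (List.zip cs (cs.drop 1)) (' ', ' ')]
  rw [List.flatMap_map]
  unfold pvEventsA
  have hlen : PySem.List.pyRange 0 (PySem.List.len (List.zip cs (cs.drop 1))) 1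
      = PySem.List.pyRange 0 (PySem.Chars.len cs - 1) 1 := by
    cases cs with
    | nil => decide
    | cons c t =>
      congr 1
      simp [PySem.List.len, PySem.Chars.len]
  rw [hlen]
  apply List.flatMap_congr
  intro j hj
  rw [PySem.List.mem_pyRange_one] at hj
  obtain ⟨hj0, hjlt⟩ := hj
  obtain ⟨m, rfl⟩ := Int.eq_ofNat_of_zero_le hj0
  have hm : m < cs.length - 1 := by
    simp only [PySem.Chars.len_eq] at hjlt; omega
  have hz : m < (List.zip cs (cs.drop 1)).length := by
    simp [List.length_zip]; omega
  have h1 : m + 1 < cs.length := by omega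
  have hget : PySem.List.pyGetD (List.zip cs (cs.drop 1)) (m : Int) (' ', ' ')
      = (cs[m]'(by omega), cs[m + 1]'h1) := by
    rw [PySem.List.pyGetD_natCast]
    rw [List.getD_eq_getElem _ _ hz]
    rw [List.getElem_zip]
    congr 1
    rw [List.getElem_drop]
    congr 1
    omega
  rw [hget]
  have hga : PySem.List.pyGetD cs (m : Int) ' ' = cs[m]'(by omega) := by
    rw [PySem.List.pyGetD_natCast, List.getD_eq_getElem _ _ (by omega)]
  have hgb : PySem.List.pyGetD cs ((m : Int) + 1) ' ' = cs[m + 1]'h1 := by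
    have : ((m : Int) + 1) = ((m + 1 : Nat) : Int) := by push_cast; ring
    rw [this, PySem.List.pyGetD_natCast, List.getD_eq_getElem _ _ h1]
  rw [hga, hgb]
  rfl

-- ===== VERDICT (by name: the statement is the Claim_ definition above) =====
theorem makeTransIndexD_spec : Claim_equal_makeTransIndexD := by
  intro seq _
  unfold Spec_makeTransIndexD makeTransIndexD_alt
  dsimp only
  rw [pvEvents_eq seq, pvA_eq_group seq, pvGroup_items]
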